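-- pv_equiv track=rewrite | github.com/oth-body/hermitclaw | tui_setup.py | _is_chat_compatible
-- ===== SOURCE A (Python) =====
-- def _is_chat_compatible(model_name: str) -> bool:
--     """Check if model is likely to support chat/function calling."""
--     # Common chat model patterns
--     chat_patterns = [
--         "llama", "mistral", "glm", "qwen", "codellama",
--         "gemma", "phi", "mixtral", "yi", "deepseek"
--     ]
--
--     # Exclude obvious non-chat models
--     exclude_patterns = [
--         "embed", "diffusion", "stable", "clip", "whisper"
--     ]
--
--     model_lower = model_name.lower()
--
--     # Check exclusions first
--     for pattern in exclude_patterns: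
--         if pattern in model_lower:
--             return False
--
--     # Check for chat patterns
--     for pattern in chat_patterns:
--         if pattern in model_lower:
--             return True
--
--     # Default to True for unknown models (let user try)
--     return True
-- ===== SOURCE B (Python) =====
-- def _is_chat_compatible(model_name: str) -> bool:
--     """Check if model is likely to support chat/function calling.
--
--     Single left-to-right scan over the lowercased name: at each position the
--     candidate exclude patterns are picked by their first character from a
--     precomputed index and checked with startswith.  (The original
--     chat_patterns scan is dead code: every path after the exclusion check
--     returns True, so only the exclusions decide the answer.)
--     """
--     by_first = {
--         "e": ["embed"],
--         "d": ["diffusion"],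
--         "s": ["stable"],
--         "c": ["clip"],
--         "w": ["whisper"],
--     }
--     s = model_name.lower()
--     for i, ch in enumerate(s):
--         for p in by_first.get(ch, []):
--             if s.startswith(p, i):
--                 return False
--     return True
-- ===== Notes on version B (the rewrite author's own statement) =====
-- stated objective: alternative
-- what changed: Instead of testing each exclude pattern (and a dead chat-pattern list) as a substring of the whole name, B makes one left-to-right pass over the lowercased name, selecting candidate patterns per position by first character from a precomputed dict index and testing startswith; the dead chat_patterns loop is gone.
import Mathlib
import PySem

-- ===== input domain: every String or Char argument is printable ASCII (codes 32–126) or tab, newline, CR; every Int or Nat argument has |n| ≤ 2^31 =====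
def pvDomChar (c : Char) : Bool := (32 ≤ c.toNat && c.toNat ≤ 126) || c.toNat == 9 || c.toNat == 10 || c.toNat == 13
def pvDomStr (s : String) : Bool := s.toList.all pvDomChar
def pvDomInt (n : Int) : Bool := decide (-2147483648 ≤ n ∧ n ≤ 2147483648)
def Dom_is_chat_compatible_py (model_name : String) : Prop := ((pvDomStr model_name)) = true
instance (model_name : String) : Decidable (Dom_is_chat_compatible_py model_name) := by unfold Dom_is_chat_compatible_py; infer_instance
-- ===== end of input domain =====

-- B replaces A's two pattern-list substring scans (the second provably dead) by one
-- left-to-right position scan with a first-character dict index (objective: alternative).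

-- ===== PORT A =====
-- Literal port of A: lowercase once, scan exclude_patterns (return False on a
-- hit), then scan chat_patterns (return True on a hit), else default True.
def chatPatterns : List String :=
  ["llama", "mistral", "glm", "qwen", "codellama",
   "gemma", "phi", "mixtral", "yi", "deepseek"]

def excludePatterns : List String :=
  ["embed", "diffusion", "stable", "clip", "whisper"]

def excludeLoop (modelLower : String) : List String → Option Bool
  | [] => none
  | p :: rest =>
      if PySem.Str.isIn p modelLower then some false else excludeLoop modelLower rest

def chatLoop (modelLower : String) : List String → Option Bool
  | [] => none
  | p :: rest =>
      if PySem.Str.isIn p modelLower then some true else chatLoop modelLower rest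

def is_chat_compatible_py (model_name : String) : Bool :=
  let modelLower := PySem.Str.lower model_name
  match excludeLoop modelLower excludePatterns with
  | some b => b
  | none =>
      match chatLoop modelLower chatPatterns with
      | some b => b
      | none => true

-- ===== PORT B =====
-- B: one pass over the positions of the lowercased name; at each position the
-- candidate patterns are by_first.get(ch, []) and s.startswith(p, i) is
-- 'p is a prefix of the current suffix'.
def byFirst : PySem.Dict String (List String) :=
  PySem.Dict.ofList
    [("e", ["embed"]), ("d", ["diffusion"]), ("s", ["stable"]),
     ("c", ["clip"]), ("w", ["whisper"])]

def scanB : List Char → Bool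
  | [] => true
  | ch :: rest =>
      if (byFirst.getD (String.ofList [ch]) []).any
           (fun p => PySem.Chars.startswith (ch :: rest) p.toList) then false
      else scanB rest

def is_chat_compatible_py_alt (model_name : String) : Bool :=
  scanB (PySem.Str.lower model_name).toList

-- ===== PRECONDITION & SPEC =====
def Spec_is_chat_compatible_py (model_name : String) (out : Bool) : Prop := out = is_chat_compatible_py_alt model_name
instance (model_name : String) (out : Bool) : Decidable (Spec_is_chat_compatible_py model_name out) := by unfold Spec_is_chat_compatible_py; infer_instance

-- ===== CLAIM (what is proved, stated in full; the proofs are below) =====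
def Claim_equal_is_chat_compatible_py : Prop := ∀ (model_name : String), Dom_is_chat_compatible_py model_name → Spec_is_chat_compatible_py model_name (is_chat_compatible_py model_name)

-- ===== LEMMAS AND PROOFS =====

-- A-SIDE: the exclude loop returns `some false` iff some exclude pattern matches.
lemma excludeLoop_eq (m : String) (ps : List String) :
    excludeLoop m ps = if ps.any (fun p => PySem.Str.isIn p m) then some false else none := by
  induction ps with
  | nil => simp [excludeLoop]
  | cons p rest ih =>
      rw [excludeLoop, ih, List.any_cons]
      cases h : PySem.Str.isIn p m <;>
        simp only [Bool.true_or, Bool.false_or] <;> rfl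

-- A-SIDE: the chat loop only ever produces `some true`.
lemma chatLoop_some_true (m : String) (ps : List String) (b : Bool)
    (hc : chatLoop m ps = some b) : b = true := by
  induction ps with
  | nil => simp [chatLoop] at hc
  | cons p rest ih =>
      simp only [chatLoop] at hc
      split at hc
      · exact (Option.some.inj hc).symm
      · exact ih hc

-- A equals "no exclude pattern occurs as a substring".
lemma a_eq_not_any (model_name : String) :
    is_chat_compatible_py model_name
      = !(excludePatterns.any (fun p => PySem.Str.isIn p (PySem.Str.lower model_name))) := by
  show (match excludeLoop (PySem.Str.lower model_name) excludePatterns with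
    | some b => b
    | none =>
      match chatLoop (PySem.Str.lower model_name) chatPatterns with
      | some b => b
      | none => true) = _
  rw [excludeLoop_eq]
  cases h : excludePatterns.any (fun p => PySem.Str.isIn p (PySem.Str.lower model_name))
  · cases hc : chatLoop (PySem.Str.lower model_name) chatPatterns with
    | none => rfl
    | some b => rw [chatLoop_some_true _ _ _ hc]; rfl
  · rfl

-- B-SIDE: single-character string keys compare like their characters.
lemma ofList_single_eq_iff (ch c : Char) :
    (String.ofList [ch] = String.ofList [c]) ↔ ch = c := by
  rw [String.ext_iff]; simp

lemma key_beq (c ch : Char) :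
    ((String.ofList [c]) == String.ofList [ch]) = (ch == c) := by
  cases h : ch == c
  · simp only [beq_eq_false_iff_ne, ne_eq] at h
    simp only [beq_eq_false_iff_ne, ne_eq, ofList_single_eq_iff]
    exact fun hh => h hh.symm
  · simp only [beq_iff_eq] at h; subst h; simp

-- B-SIDE: what the first-character index yields at each character.
lemma byFirst_getD (ch : Char) :
    byFirst.getD (String.ofList [ch]) []
      = if ch == 'e' then ["embed"]
        else if ch == 'd' then ["diffusion"]
        else if ch == 's' then ["stable"]
        else if ch == 'c' then ["clip"]
        else if ch == 'w' then ["whisper"]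
        else [] := by
  have he : ("e" : String) = String.ofList ['e'] := rfl
  have hd : ("d" : String) = String.ofList ['d'] := rfl
  have hs : ("s" : String) = String.ofList ['s'] := rfl
  have hc : ("c" : String) = String.ofList ['c'] := rfl
  have hw : ("w" : String) = String.ofList ['w'] := rfl
  show (PySem.Dict.ofList _).getD _ [] = _
  rw [PySem.Dict.getD_eq_get?_getD]
  rw [show PySem.Dict.ofList
      [("e", ["embed"]), ("d", ["diffusion"]), ("s", ["stable"]),
       ("c", ["clip"]), ("w", ["whisper"])]
      = PySem.Dict.mk
      [("e", ["embed"]), ("d", ["diffusion"]), ("s", ["stable"]),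
       ("c", ["clip"]), ("w", ["whisper"])] from rfl]
  simp only [PySem.Dict.get?_mk_cons, he, hd, hs, hc, hw, key_beq]
  by_cases h1 : ch = 'e' <;> by_cases h2 : ch = 'd' <;> by_cases h3 : ch = 's' <;>
    by_cases h4 : ch = 'c' <;> by_cases h5 : ch = 'w' <;>
    simp_all [PySem.Dict.get?]

-- A pattern starting with a different character never starts at this position.
lemma startswith_cons_ne (ch c : Char) (tl rest : List Char) (h : ¬ (ch = c)) :
    PySem.Chars.startswith (ch :: rest) (c :: tl) = false := by
  rw [← Bool.not_eq_true, PySem.Chars.startswith_iff, List.cons_prefix_cons]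
  exact fun hh => h hh.1.symm

-- At each position, the indexed candidates decide startswith exactly as the
-- full exclude list would.
lemma hit_eq (ch : Char) (rest : List Char) :
    ((byFirst.getD (String.ofList [ch]) []).any
        (fun p => PySem.Chars.startswith (ch :: rest) p.toList))
      = excludePatterns.any (fun p => PySem.Chars.startswith (ch :: rest) p.toList) := by
  rw [byFirst_getD]
  by_cases h1 : ch = 'e' <;> by_cases h2 : ch = 'd' <;> by_cases h3 : ch = 's' <;>
    by_cases h4 : ch = 'c' <;> by_cases h5 : ch = 'w' <;>
    simp_all [excludePatterns, List.any_cons, startswith_cons_ne]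

-- Substring occurrence splits into "starts here" or "occurs further right".
lemma isIn_cons (sub : List Char) (ch : Char) (rest : List Char) :
    PySem.Chars.isIn sub (ch :: rest)
      = (PySem.Chars.startswith (ch :: rest) sub || PySem.Chars.isIn sub rest) := by
  by_cases h : sub <:+: (ch :: rest)
  · rw [(PySem.Chars.isIn_iff_infix _ _).mpr h]
    rcases (List.infix_cons_iff).mp h with hp | hi
    · rw [(PySem.Chars.startswith_iff _ _).mpr hp]; rfl
    · rw [(PySem.Chars.isIn_iff_infix _ _).mpr hi, Bool.or_true]
  · rw [(PySem.Chars.isIn_eq_false_iff _ _).mpr h]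
    have hp : ¬ sub <+: (ch :: rest) := fun hh => h (List.infix_cons_iff.mpr (Or.inl hh))
    have hi : ¬ sub <:+: rest := fun hh => h (List.infix_cons_iff.mpr (Or.inr hh))
    rw [(PySem.Chars.isIn_eq_false_iff _ _).mpr hi,
        show PySem.Chars.startswith (ch :: rest) sub = false from
          by rw [← Bool.not_eq_true, PySem.Chars.startswith_iff]; exact hp]
    rfl

lemma any_or_distrib (ps : List String) (A B : String → Bool) :
    (ps.any fun p => A p || B p) = (ps.any A || ps.any B) := by
  induction ps with
  | nil => rfl
  | cons p ps ih =>
      simp only [List.any_cons, ih]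
      cases A p <;> cases B p <;> simp

lemma any_isIn_cons (ps : List String) (ch : Char) (rest : List Char) :
    ps.any (fun p => PySem.Chars.isIn p.toList (ch :: rest))
      = (ps.any (fun p => PySem.Chars.startswith (ch :: rest) p.toList)
          || ps.any (fun p => PySem.Chars.isIn p.toList rest)) := by
  simp only [isIn_cons]
  exact any_or_distrib ps _ _

-- B's scan computes "no exclude pattern occurs as a substring".
lemma scanB_eq (cs : List Char) :
    scanB cs = !(excludePatterns.any (fun p => PySem.Chars.isIn p.toList cs)) := by
  induction cs with
  | nil => decide
  | cons ch rest ih =>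
      rw [scanB, hit_eq, ih, any_isIn_cons]
      cases excludePatterns.any (fun p => PySem.Chars.startswith (ch :: rest) p.toList) <;>
        simp

-- ===== VERDICT (by name: the statement is the Claim_ definition above) =====
theorem is_chat_compatible_py_spec : Claim_equal_is_chat_compatible_py := by
  intro model_name _
  show is_chat_compatible_py model_name = is_chat_compatible_py_alt model_name
  rw [a_eq_not_any, is_chat_compatible_py_alt, scanB_eq]
  simp [PySem.Str.isIn_eq]
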